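-- pv_equiv track=rewrite | github.com/NiekDrenth/Altered_States2 | Altered_states.py | all_or_all_but_one_letters_in_string
-- ===== SOURCE A (Python) =====
-- from collections import Counter
--
-- def all_or_all_but_one_letters_in_string(short_string, long_string):
--     short_counter = Counter(short_string)
--     long_counter = Counter(long_string)
--
--     missing_count = 0
--
--     for char, count in short_counter.items():
--         if long_counter[char] < 1: #if not in long string add one to count
--             missing_count += 1
--         if missing_count > 1:
--             return False
--
--     return True
-- ===== SOURCE B (Python) =====
-- def all_or_all_but_one_letters_in_string(short_string, long_string):
--     # Find the first character of short_string absent from long_string;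
--     # the answer is True iff every later character is in long_string or equal to it.
--     for i, ch in enumerate(short_string):
--         if ch not in long_string:
--             return all(c in long_string or c == ch for c in short_string[i+1:])
--     return True
-- ===== Notes on version B (the rewrite author's own statement) =====
-- stated objective: alternative
-- what changed: Instead of building two Counters and counting distinct missing characters, B searches for the first character of short_string absent from long_string and, if found, verifies in a second pass that every later character is present in long_string or equal to that one character; no counters, no counts, no running tally.
import Mathlib
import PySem

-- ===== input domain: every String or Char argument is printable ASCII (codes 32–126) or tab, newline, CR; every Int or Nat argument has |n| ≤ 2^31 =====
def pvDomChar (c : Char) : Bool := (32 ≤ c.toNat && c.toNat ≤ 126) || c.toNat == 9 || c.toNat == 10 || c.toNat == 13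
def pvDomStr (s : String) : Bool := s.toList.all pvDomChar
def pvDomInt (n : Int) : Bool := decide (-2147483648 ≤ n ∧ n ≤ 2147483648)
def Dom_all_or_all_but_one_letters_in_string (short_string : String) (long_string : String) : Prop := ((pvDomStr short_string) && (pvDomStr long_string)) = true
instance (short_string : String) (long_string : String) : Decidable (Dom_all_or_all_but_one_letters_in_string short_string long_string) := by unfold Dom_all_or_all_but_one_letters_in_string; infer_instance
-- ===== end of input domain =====

-- B replaces A's Counter-based tally of missing characters by a first-missing-character search plus a verification pass (alternative algorithm; same return value).


-- ===== PORT A =====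
-- the 'for char, count in short_counter.items()' loop with its early 'return False'
def pvLoopA (long_counter : PySem.Dict Char Int) : List (Char × Int) → Int → Bool
  | [], _ => true
  | (ch, _) :: rest, missing_count =>
    let missing_count' := if long_counter.getD ch 0 < 1 then missing_count + 1 else missing_count
    if missing_count' > 1 then false
    else pvLoopA long_counter rest missing_count'

def all_or_all_but_one_letters_in_string (short_string : String) (long_string : String) : Bool :=
  let short_counter := PySem.Dict.counter short_string.toList
  let long_counter := PySem.Dict.counter long_string.toList
  pvLoopA long_counter short_counter.items 0

-- ===== PORT B =====
-- Source B's 'for i, ch in enumerate(short_string)' loop: structural recursion; when the first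
-- missing char ch is found, 'rest' is exactly short_string[i+1:], checked by the 'all(...)'.
def pvScanB (long : List Char) : List Char → Bool
  | [] => true
  | ch :: rest =>
    if long.contains ch then pvScanB long rest
    else rest.all (fun c => long.contains c || c == ch)

def all_or_all_but_one_letters_in_string_alt (short_string : String) (long_string : String) : Bool :=
  pvScanB long_string.toList short_string.toList

-- ===== PRECONDITION & SPEC =====
def Spec_all_or_all_but_one_letters_in_string (short_string : String) (long_string : String) (out : Bool) : Prop := out = all_or_all_but_one_letters_in_string_alt short_string long_string
instance (short_string : String) (long_string : String) (out : Bool) : Decidable (Spec_all_or_all_but_one_letters_in_string short_string long_string out) := by unfold Spec_all_or_all_but_one_letters_in_string; infer_instance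

-- ===== CLAIM (what is proved, stated in full; the proofs are below) =====
def Claim_equal_all_or_all_but_one_letters_in_string : Prop := ∀ (short_string : String) (long_string : String), Dom_all_or_all_but_one_letters_in_string short_string long_string → Spec_all_or_all_but_one_letters_in_string short_string long_string (all_or_all_but_one_letters_in_string short_string long_string)

-- ===== LEMMAS AND PROOFS =====
-- A's loop over (char, count) pairs computes: running missing count plus the number of
-- remaining chars absent from the long string stays ≤ 1.
lemma pvLoopA_counter (l : List Char) (f : Char → Int) (cs : List Char) (m : Int) (hm : m ≤ 1) :
    pvLoopA (PySem.Dict.counter l) (cs.map (fun k => (k, f k))) m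
      = decide (m + (cs.countP (fun c => !l.contains c) : Int) ≤ 1) := by
  induction cs generalizing m with
  | nil => simp [pvLoopA, hm]
  | cons c cs ih =>
    simp only [List.map_cons, pvLoopA, PySem.Dict.getD_counter]
    have hcond : ((l.count c : Int) < 1) ↔ (!l.contains c) = true := by
      constructor
      · intro h
        have : l.count c = 0 := by omega
        simp [List.count_eq_zero.mp this]
      · intro h
        have : c ∉ l := by simpa using h
        simp [List.count_eq_zero.mpr this]
    by_cases hc : (!l.contains c) = true
    · rw [if_pos (hcond.mpr hc)]
      rw [List.countP_cons_of_pos (p := fun c => !l.contains c) hc]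
      by_cases hm1 : m + 1 > 1
      · rw [if_pos hm1]
        have : 0 ≤ (cs.countP (fun c => !l.contains c) : Int) := by positivity
        symm; simp only [decide_eq_false_iff_not]; push_cast; omega
      · rw [if_neg hm1, ih (m + 1) (by omega)]
        congr 1
        apply propext
        omega
    · rw [if_neg (fun h => hc (hcond.mp h))]
      rw [List.countP_cons_of_neg (p := fun c => !l.contains c) (by simpa using hc)]
      have : ¬ m > 1 := by omega
      rw [if_neg this, ih m hm]

-- a nodup list has at most one element satisfying p iff all its p-elements coincide
lemma countP_le_one_iff (u : List Char) (hu : u.Nodup) (p : Char → Bool) :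
    u.countP p ≤ 1 ↔ ∀ a ∈ u, ∀ b ∈ u, p a → p b → a = b := by
  induction u with
  | nil => simp
  | cons c u ih =>
    rcases List.nodup_cons.mp hu with ⟨hc, hu'⟩
    by_cases hp : p c = true
    · rw [List.countP_cons_of_pos hp]
      constructor
      · intro h a ha b hb hpa hpb
        have hz : u.countP p = 0 := by omega
        have hnone : ∀ x ∈ u, ¬ p x = true := by
          intro x hx hpx
          have := List.countP_eq_zero.mp hz x hx
          exact this hpx
        rcases List.mem_cons.mp ha with rfl | ha'
        · rcases List.mem_cons.mp hb with rfl | hb'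
          · rfl
          · exact absurd hpb (hnone b hb')
        · exact absurd hpa (hnone a ha')
      · intro h
        have hz : u.countP p = 0 := by
          rw [List.countP_eq_zero]
          intro x hx hpx
          have := h x (List.mem_cons_of_mem _ hx) c (List.mem_cons_self)
          exact hc ((this hpx hp) ▸ hx)
        omega
    · rw [List.countP_cons_of_neg (by simpa using hp)]
      rw [ih hu']
      constructor
      · intro h a ha b hb hpa hpb
        rcases List.mem_cons.mp ha with rfl | ha'
        · exact absurd hpa hp
        · rcases List.mem_cons.mp hb with rfl | hb'
          · exact absurd hpb hp
          · exact h a ha' b hb' hpa hpb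
      · intro h a ha b hb hpa hpb
        exact h a (List.mem_cons_of_mem _ ha) b (List.mem_cons_of_mem _ hb) hpa hpb

-- B's scan decides exactly the "all missing characters coincide" property
lemma pvScanB_eq (l cs : List Char) :
    pvScanB l cs = decide (∀ a ∈ cs, ∀ b ∈ cs, ¬ l.contains a → ¬ l.contains b → a = b) := by
  induction cs with
  | nil => simp [pvScanB]
  | cons c cs ih =>
    by_cases hc : l.contains c = true
    · rw [pvScanB, if_pos hc, ih]
      congr 1
      apply propext
      constructor
      · intro h a ha b hb hla hlb
        rcases List.mem_cons.mp ha with rfl | ha'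
        · exact absurd hc hla
        · rcases List.mem_cons.mp hb with rfl | hb'
          · exact absurd hc hlb
          · exact h a ha' b hb' hla hlb
      · intro h a ha b hb hla hlb
        exact h a (List.mem_cons_of_mem _ ha) b (List.mem_cons_of_mem _ hb) hla hlb
    · rw [pvScanB, if_neg hc, Bool.eq_iff_iff, decide_eq_true_eq, List.all_eq_true]
      constructor
      · intro hall a ha b hb hla hlb
        have key : ∀ x ∈ cs, ¬ l.contains x = true → x = c := by
          intro x hx hlx
          have := hall x hx
          simp only [Bool.or_eq_true, beq_iff_eq] at this
          rcases this with h1 | h2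
          · exact absurd h1 hlx
          · exact h2
        rcases List.mem_cons.mp ha with rfl | ha'
        · rcases List.mem_cons.mp hb with rfl | hb'
          · rfl
          · exact (key b hb' hlb).symm
        · rcases List.mem_cons.mp hb with rfl | hb'
          · exact key a ha' hla
          · rw [key a ha' hla, key b hb' hlb]
      · intro h x hx
        simp only [Bool.or_eq_true, beq_iff_eq]
        by_cases hlx : l.contains x = true
        · exact Or.inl hlx
        · exact Or.inr (h x (List.mem_cons_of_mem _ hx) c List.mem_cons_self hlx hc)

-- ===== VERDICT (by name: the statement is the Claim_ definition above) =====
theorem all_or_all_but_one_letters_in_string_spec : Claim_equal_all_or_all_but_one_letters_in_string := by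
  intro s l _
  unfold Spec_all_or_all_but_one_letters_in_string
  simp only [all_or_all_but_one_letters_in_string, all_or_all_but_one_letters_in_string_alt]
  rw [PySem.Dict.items_counter]
  rw [pvLoopA_counter l.toList _ _ 0 (by omega)]
  rw [pvScanB_eq]
  congr 1
  apply propext
  rw [zero_add]
  rw [show (((PySem.Set.ofList s.toList).countP (fun c => !l.toList.contains c) : Int) ≤ 1 ↔
      (PySem.Set.ofList s.toList).countP (fun c => !l.toList.contains c) ≤ 1) from by omega]
  rw [countP_le_one_iff _ (PySem.Set.nodup_ofList _)]
  constructor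
  · intro h a ha b hb hla hlb
    exact h a ((PySem.Set.mem_ofList _ _).mpr ha) b ((PySem.Set.mem_ofList _ _).mpr hb)
      (by simpa using hla) (by simpa using hlb)
  · intro h a ha b hb hpa hpb
    exact h a ((PySem.Set.mem_ofList _ _).mp ha) b ((PySem.Set.mem_ofList _ _).mp hb)
      (by simpa using hpa) (by simpa using hpb)
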